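-- pv_equiv track=rewrite | github.com/AnhDieu19/chiemboclyso | python/core/palace_converter.py | get_adjacent_palaces
-- ===== SOURCE A (Python) =====
-- from typing import Dict, Tuple
--
-- LAC_THU_LAYOUT = [
--     [4, 9, 2],  # Row 0: Tốn, Ly, Khôn
--     [3, 5, 7],  # Row 1: Chấn, Trung, Đoài
--     [8, 1, 6],  # Row 2: Cấn, Khảm, Càn
-- ]
--
-- def get_palace_position(palace_idx: int) -> Tuple[int, int]:
--     """
--     Lấy vị trí (row, col) của cung trong layout 3x3
--
--     Args:
--         palace_idx: 1-9
--
--     Returns: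
--         (row, col) với row, col trong [0, 1, 2]
--     """
--     for row in range(3):
--         for col in range(3):
--             if LAC_THU_LAYOUT[row][col] == palace_idx:
--                 return (row, col)
--     return (1, 1)  # Default: Trung Cung
--
-- def get_adjacent_palaces(palace_idx: int) -> Dict[str, int]:
--     """
--     Lấy các cung liền kề
--
--     Args:
--         palace_idx: 1-9
--
--     Returns:
--         Dict với direction: palace_idx
--     """
--     row, col = get_palace_position(palace_idx)
--     adjacent = {}
--
--     directions = [
--         ('Bắc', -1, 0),
--         ('Nam', 1, 0),
--         ('Đông', 0, 1),
--         ('Tây', 0, -1),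
--         ('Đông Bắc', -1, 1),
--         ('Đông Nam', 1, 1),
--         ('Tây Bắc', -1, -1),
--         ('Tây Nam', 1, -1),
--     ]
--
--     for dir_name, dr, dc in directions:
--         new_row, new_col = row + dr, col + dc
--         if 0 <= new_row < 3 and 0 <= new_col < 3:
--             adjacent[dir_name] = LAC_THU_LAYOUT[new_row][new_col]
--
--     return adjacent
-- ===== SOURCE B (Python) =====
-- from typing import Dict
--
-- # Precomputed adjacency table for the fixed 3x3 Lac Thu grid; unknown indices
-- # fall back to the center palace (5), matching the original's (1,1) default.
-- _ADJACENT = {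
--     1: {'Bắc': 5, 'Đông': 6, 'Tây': 8, 'Đông Bắc': 7, 'Tây Bắc': 3},
--     2: {'Nam': 7, 'Tây': 9, 'Tây Nam': 5},
--     3: {'Bắc': 4, 'Nam': 8, 'Đông': 5, 'Đông Bắc': 9, 'Đông Nam': 1},
--     4: {'Nam': 3, 'Đông': 9, 'Đông Nam': 5},
--     5: {'Bắc': 9, 'Nam': 1, 'Đông': 7, 'Tây': 3,
--         'Đông Bắc': 2, 'Đông Nam': 6, 'Tây Bắc': 4, 'Tây Nam': 8},
--     6: {'Bắc': 7, 'Tây': 1, 'Tây Bắc': 5},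
--     7: {'Bắc': 2, 'Nam': 6, 'Tây': 5, 'Tây Bắc': 9, 'Tây Nam': 1},
--     8: {'Bắc': 3, 'Đông': 1, 'Đông Bắc': 5},
--     9: {'Nam': 5, 'Đông': 2, 'Tây': 4, 'Đông Nam': 7, 'Tây Nam': 3},
-- }
--
-- def get_adjacent_palaces(palace_idx: int) -> Dict[str, int]:
--     return dict(_ADJACENT.get(palace_idx, _ADJACENT[5]))
-- ===== Notes on version B (the rewrite author's own statement) =====
-- stated objective: simpler
-- what changed: Replaces A's 3x3 grid scan plus per-call 8-direction offset/bounds loop with a single precomputed adjacency table keyed by palace index, with palace 5 (A's center-cell default) as fallback for unknown indices.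
import Mathlib
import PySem

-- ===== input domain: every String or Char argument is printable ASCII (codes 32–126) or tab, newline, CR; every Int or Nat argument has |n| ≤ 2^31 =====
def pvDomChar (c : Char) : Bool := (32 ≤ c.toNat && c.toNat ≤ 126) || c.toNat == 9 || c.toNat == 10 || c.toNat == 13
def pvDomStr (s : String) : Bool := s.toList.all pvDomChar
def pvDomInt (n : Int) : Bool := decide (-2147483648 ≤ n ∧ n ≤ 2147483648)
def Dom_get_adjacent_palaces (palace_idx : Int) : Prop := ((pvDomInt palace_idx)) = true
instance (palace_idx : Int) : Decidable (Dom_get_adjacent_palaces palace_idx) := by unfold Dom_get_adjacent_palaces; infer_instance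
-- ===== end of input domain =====

-- B replaces A's grid scan + 8-direction bounds loop by a single precomputed
-- adjacency table keyed by palace index (fallback: palace 5, A's (1,1) default).

-- ===== PORT A =====
def lacThuLayout : List (List Int) := [[4, 9, 2], [3, 5, 7], [8, 1, 6]]

-- cell read LAC_THU_LAYOUT[r][c]; A only reads indices in range, where this is exact
def lacGet (r c : Int) : Int :=
  (PySem.List.pyGet? ((PySem.List.pyGet? lacThuLayout r).getD []) c).getD 0

-- the nested 'for row in range(3): for col in range(3)' scan, first match wins
def get_palace_position (palace_idx : Int) : Int × Int :=
  match (PySem.List.pyRange 0 3 1).flatMap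
      (fun r => (PySem.List.pyRange 0 3 1).map (fun c => (r, c)))
    |>.find? (fun rc => lacGet rc.1 rc.2 == palace_idx) with
  | some rc => rc
  | none => (1, 1)

def aDirections : List (String × Int × Int) :=
  [("Bắc", -1, 0), ("Nam", 1, 0), ("Đông", 0, 1), ("Tây", 0, -1),
   ("Đông Bắc", -1, 1), ("Đông Nam", 1, 1), ("Tây Bắc", -1, -1), ("Tây Nam", 1, -1)]

def get_adjacent_palaces (palace_idx : Int) : List (String × Int) :=
  let rc := get_palace_position palace_idx
  (aDirections.foldl (fun adjacent d =>
    let nr := rc.1 + d.2.1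
    let nc := rc.2 + d.2.2
    if 0 ≤ nr ∧ nr < 3 ∧ 0 ≤ nc ∧ nc < 3 then
      PySem.Dict.insert adjacent d.1 (lacGet nr nc)
    else adjacent) PySem.Dict.empty).items

-- ===== PORT B =====
def adjTable : PySem.Dict Int (List (String × Int)) :=
  PySem.Dict.ofList
  [ (1, [("Bắc", 5), ("Đông", 6), ("Tây", 8), ("Đông Bắc", 7), ("Tây Bắc", 3)]),
    (2, [("Nam", 7), ("Tây", 9), ("Tây Nam", 5)]),
    (3, [("Bắc", 4), ("Nam", 8), ("Đông", 5), ("Đông Bắc", 9), ("Đông Nam", 1)]),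
    (4, [("Nam", 3), ("Đông", 9), ("Đông Nam", 5)]),
    (5, [("Bắc", 9), ("Nam", 1), ("Đông", 7), ("Tây", 3),
         ("Đông Bắc", 2), ("Đông Nam", 6), ("Tây Bắc", 4), ("Tây Nam", 8)]),
    (6, [("Bắc", 7), ("Tây", 1), ("Tây Bắc", 5)]),
    (7, [("Bắc", 2), ("Nam", 6), ("Tây", 5), ("Tây Bắc", 9), ("Tây Nam", 1)]),
    (8, [("Bắc", 3), ("Đông", 1), ("Đông Bắc", 5)]),
    (9, [("Nam", 5), ("Đông", 2), ("Tây", 4), ("Đông Nam", 7), ("Tây Nam", 3)]) ]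

def get_adjacent_palaces_alt (palace_idx : Int) : List (String × Int) :=
  adjTable.getD palace_idx (adjTable.getD 5 [])

-- ===== PRECONDITION & SPEC =====
def Spec_get_adjacent_palaces (palace_idx : Int) (out : List (String × Int)) : Prop := out = get_adjacent_palaces_alt palace_idx
instance (palace_idx : Int) (out : List (String × Int)) : Decidable (Spec_get_adjacent_palaces palace_idx out) := by unfold Spec_get_adjacent_palaces; infer_instance

-- ===== CLAIM (what is proved, stated in full; the proofs are below) =====
def Claim_equal_get_adjacent_palaces : Prop := ∀ (palace_idx : Int), Dom_get_adjacent_palaces palace_idx → Spec_get_adjacent_palaces palace_idx (get_adjacent_palaces palace_idx)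

-- ===== LEMMAS AND PROOFS =====

-- Outside 1..9 A's scan finds no cell and defaults to the center (1,1).
theorem A_default (i : Int) (h1 : i ≠ 1) (h2 : i ≠ 2) (h3 : i ≠ 3) (h4 : i ≠ 4)
    (h5 : i ≠ 5) (h6 : i ≠ 6) (h7 : i ≠ 7) (h8 : i ≠ 8) (h9 : i ≠ 9) :
    get_adjacent_palaces i = get_adjacent_palaces_alt 5 := by
  have hp : get_palace_position i = (1, 1) := by
    simp [get_palace_position, lacGet, lacThuLayout, PySem.List.pyGet?, PySem.List.pyIdx?,
      show PySem.List.pyRange 0 3 1 = [0, 1, 2] from by decide,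
      List.find?, List.flatMap,
      beq_eq_false_iff_ne.mpr (Ne.symm h1), beq_eq_false_iff_ne.mpr (Ne.symm h2),
      beq_eq_false_iff_ne.mpr (Ne.symm h3), beq_eq_false_iff_ne.mpr (Ne.symm h4),
      beq_eq_false_iff_ne.mpr (Ne.symm h5), beq_eq_false_iff_ne.mpr (Ne.symm h6),
      beq_eq_false_iff_ne.mpr (Ne.symm h7), beq_eq_false_iff_ne.mpr (Ne.symm h8),
      beq_eq_false_iff_ne.mpr (Ne.symm h9)]
  rw [get_adjacent_palaces, hp]
  decide

-- B ignores indices outside the table and returns palace 5's row.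
theorem B_default (i : Int) (h1 : i ≠ 1) (h2 : i ≠ 2) (h3 : i ≠ 3) (h4 : i ≠ 4)
    (h5 : i ≠ 5) (h6 : i ≠ 6) (h7 : i ≠ 7) (h8 : i ≠ 8) (h9 : i ≠ 9) :
    get_adjacent_palaces_alt i = get_adjacent_palaces_alt 5 := by
  simp [get_adjacent_palaces_alt, adjTable, PySem.Dict.getD, PySem.Dict.get?, PySem.Dict.ofList,
    PySem.Dict.update, PySem.Dict.insert, PySem.Dict.contains, PySem.Dict.empty,
    List.find?,
    beq_eq_false_iff_ne.mpr (Ne.symm h1), beq_eq_false_iff_ne.mpr (Ne.symm h2),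
    beq_eq_false_iff_ne.mpr (Ne.symm h3), beq_eq_false_iff_ne.mpr (Ne.symm h4),
    beq_eq_false_iff_ne.mpr (Ne.symm h5), beq_eq_false_iff_ne.mpr (Ne.symm h6),
    beq_eq_false_iff_ne.mpr (Ne.symm h7), beq_eq_false_iff_ne.mpr (Ne.symm h8),
    beq_eq_false_iff_ne.mpr (Ne.symm h9)]

-- ===== VERDICT (by name: the statement is the Claim_ definition above) =====
theorem get_adjacent_palaces_spec : Claim_equal_get_adjacent_palaces := by
  intro i _
  unfold Spec_get_adjacent_palaces
  by_cases h1 : i = 1; · subst h1; decide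
  by_cases h2 : i = 2; · subst h2; decide
  by_cases h3 : i = 3; · subst h3; decide
  by_cases h4 : i = 4; · subst h4; decide
  by_cases h5 : i = 5; · subst h5; decide
  by_cases h6 : i = 6; · subst h6; decide
  by_cases h7 : i = 7; · subst h7; decide
  by_cases h8 : i = 8; · subst h8; decide
  by_cases h9 : i = 9; · subst h9; decide
  rw [A_default i h1 h2 h3 h4 h5 h6 h7 h8 h9,
      B_default i h1 h2 h3 h4 h5 h6 h7 h8 h9]
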